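-- pv_equiv track=rewrite | github.com/Moxiis/CS50 | Pset6/Dna.py | check
-- ===== SOURCE A (Python) =====
-- def check(text,sequence):
--     # initializing count and max(and 2 help variable)
--     count = 0
--     max  = 0
--     j = 0
--     k = 0
--
--     # checking how many STR in file
--     for i in range(len(text)):
--         check = True
--         if text[i:i + len(sequence)] == sequence:
--             count += 1
--             while check == True:
--                 j += len(sequence)
--                 k += len(sequence)
--                 if text[i + j:i + k + len(sequence)] == sequence:
--                     count += 1
--                 else:
--                     if count > max:
--                         max = count
--                     check = False
--                     j = 0
--                     k = 0
--                     count = 0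
--     return max
-- ===== SOURCE B (Python) =====
-- def check(text, sequence):
--     L = len(sequence)
--     n = len(text)
--     if L == 0:
--         return 0
--     runs = {}   # runs[i] = number of consecutive copies of sequence starting at i
--     best = 0
--     for i in reversed(range(n - L + 1)):
--         if text[i:i + L] == sequence:
--             r = runs.get(i + L, 0) + 1
--             runs[i] = r
--             if r > best:
--                 best = r
--     return best
-- ===== Notes on version B (the rewrite author's own statement) =====
-- stated objective: faster
-- what changed: Replaced A's quadratic rescan (for every index it re-walks the whole run of consecutive matches) by a single backward pass with a dictionary of run lengths: runs[i] = runs.get(i+L,0)+1, keeping the max.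
import Mathlib
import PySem

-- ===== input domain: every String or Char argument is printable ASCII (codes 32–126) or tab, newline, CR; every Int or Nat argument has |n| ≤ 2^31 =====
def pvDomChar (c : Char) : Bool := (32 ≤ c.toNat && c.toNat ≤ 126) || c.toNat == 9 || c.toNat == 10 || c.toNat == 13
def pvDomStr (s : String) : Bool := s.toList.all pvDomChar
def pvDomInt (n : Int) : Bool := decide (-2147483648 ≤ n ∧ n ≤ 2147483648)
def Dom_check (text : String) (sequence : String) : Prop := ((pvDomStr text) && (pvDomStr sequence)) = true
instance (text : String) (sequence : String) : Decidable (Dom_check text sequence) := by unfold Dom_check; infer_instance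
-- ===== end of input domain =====

-- B replaces A's rescanning of every run of consecutive matches by a single backward
-- pass with a dictionary of run lengths (objective: faster).

-- ===== PORT A =====
-- the inner `while check == True:` loop; state (count, max, j, k); the fuel only
-- bounds the iterations (under Pre_check, text.length + 1 iterations always suffice)
def checkWhile (t s : List Char) (i : Nat) : Nat → Int → Int → Int → Int → Int × Int × Int × Int
  | 0, count, mx, j, k => (count, mx, j, k)
  | fuel + 1, count, mx, j, k =>
    if PySem.List.slice t (some ((i : Int) + (j + s.length))) (some ((i : Int) + (k + s.length) + s.length)) = s then
      checkWhile t s i fuel (count + 1) mx (j + s.length) (k + s.length)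
    else
      (0, if count > mx then count else mx, 0, 0)

def check (text : String) (sequence : String) : Int :=
  let t := text.toList
  let s := sequence.toList
  let r := (List.range t.length).foldl (fun (st : Int × Int × Int × Int) (i : Nat) =>
      if PySem.List.slice t (some (i : Int)) (some ((i : Int) + s.length)) = s then
        checkWhile t s i (t.length + 1) (st.1 + 1) st.2.1 st.2.2.1 st.2.2.2
      else
        st) (0, 0, 0, 0)
  r.2.1

-- ===== PORT B =====
def check_alt (text : String) (sequence : String) : Int :=
  let t := text.toList
  let s := sequence.toList
  if s.length = 0 then 0 else
  let r := ((PySem.List.pyRange 0 ((t.length : Int) - (s.length : Int) + 1) 1).reverse).foldl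
      (fun (st : PySem.Dict Int Int × Int) (i : Int) =>
        if PySem.List.slice t (some i) (some (i + s.length)) = s then
          let rr := st.1.getD (i + s.length) 0 + 1
          (st.1.insert i rr, if rr > st.2 then rr else st.2)
        else st) (PySem.Dict.empty, 0)
  r.2

-- ===== PRECONDITION & SPEC =====
-- Pre_ excludes sequence = "" with nonempty text: there A's inner while-loop never
-- terminates (text[i:i] == "" holds forever), so A returns on no such input.
def Pre_check (text : String) (sequence : String) : Prop := sequence ≠ "" ∨ text = ""
instance (text : String) (sequence : String) : Decidable (Pre_check text sequence) := by
  unfold Pre_check; infer_instance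

def pvWitness_check : String × String := ("ACGTACGTAC", "ACGT")

def Spec_check (text : String) (sequence : String) (out : Int) : Prop := out = check_alt text sequence
instance (text : String) (sequence : String) (out : Int) : Decidable (Spec_check text sequence out) := by
  unfold Spec_check; infer_instance

-- ===== CLAIM (what is proved, stated in full; the proofs are below) =====
def Claim_equal_check : Prop := ∀ (text : String) (sequence : String), Dom_check text sequence → Pre_check text sequence → Spec_check text sequence (check text sequence)

-- ===== LEMMAS AND PROOFS =====

-- number of consecutive copies of s starting at position m of t (fuel-bounded)
def pvRunF (t s : List Char) : Nat → Nat → Nat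
  | 0, _ => 0
  | f + 1, m => if (t.drop m).take s.length = s then pvRunF t s f (m + s.length) + 1 else 0

def pvRun (t s : List Char) (m : Nat) : Nat := pvRunF t s (t.length + 1) m

-- a match at m fits inside t
theorem pvMatch_le {t s : List Char} {m : Nat} (hs : 1 ≤ s.length)
    (h : (t.drop m).take s.length = s) : m + s.length ≤ t.length := by
  have := congrArg List.length h
  simp at this
  omega

theorem pvRunF_eq_zero {t s : List Char} (hs : 1 ≤ s.length) :
    ∀ f m, t.length < m → pvRunF t s f m = 0 := by
  intro f
  induction f with
  | zero => intro m _; rfl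
  | succ f _ =>
    intro m hm
    simp only [pvRunF]
    rw [if_neg (fun h => by have := pvMatch_le hs h; omega)]

theorem pvRunF_stable {t s : List Char} (hs : 1 ≤ s.length) :
    ∀ f g m, t.length < m + f → t.length < m + g → pvRunF t s f m = pvRunF t s g m := by
  intro f
  induction f with
  | zero =>
    intro g m hf _
    rw [pvRunF_eq_zero hs g m (by omega)]; rfl
  | succ f ih =>
    intro g m hf hg
    match g with
    | 0 =>
      rw [pvRunF_eq_zero hs (f + 1) m (by omega)]; rfl
    | g + 1 =>
      simp only [pvRunF]
      by_cases h : (t.drop m).take s.length = s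
      · have hle := pvMatch_le hs h
        rw [if_pos h, if_pos h, ih g (m + s.length) (by omega) (by omega)]
      · rw [if_neg h, if_neg h]

theorem pvRun_unfold {t s : List Char} (hs : 1 ≤ s.length) (m : Nat) :
    pvRun t s m = if (t.drop m).take s.length = s then pvRun t s (m + s.length) + 1 else 0 := by
  show pvRunF t s (t.length + 1) m = _
  simp only [pvRunF]
  by_cases h : (t.drop m).take s.length = s
  · rw [if_pos h, if_pos h,
      pvRunF_stable hs t.length (t.length + 1) (m + s.length) (by omega) (by omega)]
    rfl
  · rw [if_neg h, if_neg h]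

theorem pvRun_zero {t s : List Char} (hs : 1 ≤ s.length) {m : Nat}
    (h : t.length < m + s.length) : pvRun t s m = 0 := by
  rw [pvRun_unfold hs]
  by_cases hm : (t.drop m).take s.length = s
  · have := pvMatch_le hs hm; omega
  · rw [if_neg hm]

-- the "keep the maximum run" fold step shared by the two characterisations
def pvStep (t s : List Char) (b : Int) (i : Nat) : Int :=
  if (pvRun t s i : Int) > b then (pvRun t s i : Int) else b

theorem pvStep_eq_max (t s : List Char) (b : Int) (i : Nat) :
    pvStep t s b i = max b (pvRun t s i : Int) := by
  unfold pvStep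
  rcases lt_or_ge b (pvRun t s i : Int) with h | h
  · rw [if_pos h, max_eq_right h.le]
  · rw [if_neg (not_lt.mpr h), max_eq_left h]

theorem pvStep_nonneg {t s : List Char} {b : Int} (hb : 0 ≤ b) (i : Nat) :
    0 ≤ pvStep t s b i := by
  rw [pvStep_eq_max]; positivity

theorem pvStep_of_run_zero {t s : List Char} {b : Int} (hb : 0 ≤ b) {i : Nat}
    (h : pvRun t s i = 0) : pvStep t s b i = b := by
  rw [pvStep_eq_max, h]
  simpa using hb

-- the while loop: final max = max(mx, count + run(i + j + L)), counters reset
theorem checkWhile_eq {t s : List Char} (hs : 1 ≤ s.length) (i : Nat) :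
    ∀ f (c mx : Int) (jn : Nat), t.length < i + jn + s.length + f →
      checkWhile t s i (f + 1) c mx (jn : Int) (jn : Int) =
        (0, (if c + (pvRun t s (i + jn + s.length) : Int) > mx
              then c + (pvRun t s (i + jn + s.length) : Int) else mx), 0, 0) := by
  intro f
  induction f with
  | zero =>
    intro c mx jn hf
    have hrun : pvRun t s (i + jn + s.length) = 0 := pvRun_zero hs (by omega)
    simp only [checkWhile]
    rw [if_neg (by
      rw [show ((i : Int) + ((jn : Int) + (s.length : Int))) = ((i + jn + s.length : Nat) : Int) by push_cast; ring,
        PySem.List.slice_natCast_add]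
      exact fun h => by have := pvMatch_le hs h; omega)]
    rw [hrun]
    norm_num
  | succ f ih =>
    intro c mx jn hf
    have hcast : ((i : Int) + ((jn : Int) + (s.length : Int))) = ((i + jn + s.length : Nat) : Int) := by
      push_cast; ring
    by_cases h : (t.drop (i + jn + s.length)).take s.length = s
    · have hle := pvMatch_le hs h
      have hstep : checkWhile t s i (f + 1 + 1) c mx (jn : Int) (jn : Int) =
          checkWhile t s i (f + 1) (c + 1) mx ((jn : Int) + (s.length : Int)) ((jn : Int) + (s.length : Int)) := by
        simp only [checkWhile]
        rw [if_pos (by rw [hcast, PySem.List.slice_natCast_add]; exact h)]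
      have hjj : (jn : Int) + (s.length : Int) = ((jn + s.length : Nat) : Int) := by push_cast; ring
      rw [hstep, hjj, ih (c + 1) mx (jn + s.length) (by omega)]
      have hr : pvRun t s (i + jn + s.length) = pvRun t s (i + (jn + s.length) + s.length) + 1 := by
        rw [pvRun_unfold hs (i + jn + s.length), if_pos h]
        congr 2
        omega
      rw [hr]
      have harith : c + 1 + (pvRun t s (i + (jn + s.length) + s.length) : Int) =
          c + ((pvRun t s (i + (jn + s.length) + s.length) : Int) + 1) := by ring
      push_cast
      rw [harith]
    · have hrun : pvRun t s (i + jn + s.length) = 0 := by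
        rw [pvRun_unfold hs, if_neg h]
      simp only [checkWhile]
      rw [if_neg (by rw [hcast, PySem.List.slice_natCast_add]; exact h)]
      rw [hrun]
      norm_num

-- A's outer fold, characterised as a max-of-runs fold
theorem check_fold {t s : List Char} (hs : 1 ≤ s.length) :
    ∀ (l : List Nat) (mx : Int), 0 ≤ mx →
      ((l.foldl (fun (st : Int × Int × Int × Int) (i : Nat) =>
        if PySem.List.slice t (some (i : Int)) (some ((i : Int) + s.length)) = s then
          checkWhile t s i (t.length + 1) (st.1 + 1) st.2.1 st.2.2.1 st.2.2.2
        else st) (0, mx, 0, 0)).2.1) = l.foldl (pvStep t s) mx := by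
  intro l
  induction l with
  | nil => intro mx _; rfl
  | cons i l ih =>
    intro mx hmx
    simp only [List.foldl_cons]
    by_cases h : (t.drop i).take s.length = s
    · rw [if_pos (by rw [PySem.List.slice_natCast_add]; exact h)]
      have hw := checkWhile_eq (t := t) hs i t.length (0 + 1) mx 0 (by omega)
      rw [show ((0 : Nat) : Int) = (0 : Int) from rfl] at hw
      have hr : pvRun t s i = pvRun t s (i + 0 + s.length) + 1 := by
        rw [pvRun_unfold hs i, if_pos h]
        norm_num
      have hstep : pvStep t s mx i =
          (if 0 + 1 + (pvRun t s (i + 0 + s.length) : Int) > mx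
            then 0 + 1 + (pvRun t s (i + 0 + s.length) : Int) else mx) := by
        unfold pvStep
        rw [hr]
        push_cast
        ring_nf
      rw [hw, ← hstep, ih _ (pvStep_nonneg hmx i)]
    · rw [if_neg (by rw [PySem.List.slice_natCast_add]; exact h)]
      have hrun : pvRun t s i = 0 := by rw [pvRun_unfold hs, if_neg h]
      rw [ih mx hmx, pvStep_of_run_zero hmx hrun]

theorem check_char {text sequence : String} (hs : 1 ≤ sequence.toList.length) :
    check text sequence =
      (List.range text.toList.length).foldl (pvStep text.toList sequence.toList) 0 := by
  unfold check
  exact check_fold hs (List.range text.toList.length) 0 le_rfl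

-- B's fold, characterised: dictionary invariant over the descending index list
theorem check_alt_fold {t s : List Char} (hs : 1 ≤ s.length) :
    ∀ (mm : Nat) (d : PySem.Dict Int Int) (b : Int), 0 ≤ b →
      (∀ k : Nat, mm ≤ k → d.getD (k : Int) 0 = (pvRun t s k : Int)) →
      (∀ k : Nat, k < mm → d.getD (k : Int) 0 = 0) →
      ((((List.range mm).map (fun (k : Nat) => (0 : Int) + (k : Int))).reverse).foldl
        (fun (st : PySem.Dict Int Int × Int) (i : Int) =>
          if PySem.List.slice t (some i) (some (i + s.length)) = s then
            let rr := st.1.getD (i + s.length) 0 + 1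
            (st.1.insert i rr, if rr > st.2 then rr else st.2)
          else st) (d, b)).2 = ((List.range mm).reverse).foldl (pvStep t s) b := by
  intro mm
  induction mm with
  | zero => intro d b _ _ _; rfl
  | succ mm ih =>
    intro d b hb H1 H2
    rw [List.range_succ, List.map_append, List.reverse_append, List.reverse_append]
    simp only [List.map_cons, List.map_nil, List.reverse_cons, List.reverse_nil,
      List.nil_append, List.cons_append, List.foldl_cons]
    have hc0 : (0 : Int) + (mm : Int) = ((mm : Nat) : Int) := by ring
    have hcast : (0 : Int) + (mm : Int) + (s.length : Int) = ((mm + s.length : Nat) : Int) := by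
      push_cast; ring
    by_cases h : (t.drop mm).take s.length = s
    · rw [if_pos (by rw [hc0, PySem.List.slice_natCast_add]; exact h)]
      have hget : d.getD ((0 : Int) + (mm : Int) + (s.length : Int)) 0 =
          (pvRun t s (mm + s.length) : Int) := by
        rw [hcast]; exact H1 (mm + s.length) (by omega)
      have hrun : pvRun t s mm = pvRun t s (mm + s.length) + 1 := by
        rw [pvRun_unfold hs, if_pos h]
      have hstep : pvStep t s b mm =
          (if d.getD ((0 : Int) + (mm : Int) + (s.length : Int)) 0 + 1 > b
            then d.getD ((0 : Int) + (mm : Int) + (s.length : Int)) 0 + 1 else b) := by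
        unfold pvStep
        rw [hget, hrun]
        push_cast
        ring_nf
      rw [ih _ _ ?_ ?_ ?_, ← hstep]
      · rw [← hstep]
        exact pvStep_nonneg hb mm
      · intro k hk
        rcases eq_or_lt_of_le hk with rfl | hlt
        · rw [PySem.Dict.getD_insert, if_pos (by ring), hget, hrun]
          push_cast
          ring
        · rw [PySem.Dict.getD_insert, if_neg (by
            intro hcon
            rw [hc0] at hcon
            have : (k : Nat) = mm := by exact_mod_cast hcon
            omega)]
          exact H1 k (by omega)
      · intro k hk
        rw [PySem.Dict.getD_insert, if_neg (by
          intro hcon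
          rw [hc0] at hcon
          have : (k : Nat) = mm := by exact_mod_cast hcon
          omega)]
        exact H2 k (by omega)
    · rw [if_neg (by rw [hc0, PySem.List.slice_natCast_add]; exact h)]
      have hrun : pvRun t s mm = 0 := by rw [pvRun_unfold hs, if_neg h]
      rw [ih d b hb ?_ ?_, pvStep_of_run_zero hb hrun]
      · intro k hk
        rcases eq_or_lt_of_le hk with rfl | hlt
        · rw [H2 mm (by omega), hrun]
          norm_num
        · exact H1 k (by omega)
      · intro k hk
        exact H2 k (by omega)

theorem check_alt_char {text sequence : String} (hs : 1 ≤ sequence.toList.length) :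
    check_alt text sequence =
      ((List.range (text.toList.length + 1 - sequence.toList.length)).reverse).foldl
        (pvStep text.toList sequence.toList) 0 := by
  unfold check_alt
  rw [if_neg (by omega)]
  rw [PySem.List.pyRange_one]
  have hm : ((text.toList.length : Int) - (sequence.toList.length : Int) + 1 - 0).toNat =
      text.toList.length + 1 - sequence.toList.length := by omega
  rw [hm]
  exact check_alt_fold hs _ PySem.Dict.empty 0 le_rfl
    (fun k _ => by
      rw [PySem.Dict.getD_empty, pvRun_zero hs (by omega)]
      rfl)
    (fun k _ => by rw [PySem.Dict.getD_empty])

-- fold over indices whose runs are all zero leaves a nonnegative accumulator alone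
theorem fold_step_zeros {t s : List Char} :
    ∀ (l : List Nat) (b : Int), 0 ≤ b → (∀ i ∈ l, pvRun t s i = 0) →
      l.foldl (pvStep t s) b = b := by
  intro l
  induction l with
  | nil => intro b _ _; rfl
  | cons i l ih =>
    intro b hb hz
    simp only [List.foldl_cons]
    rw [pvStep_of_run_zero hb (hz i (by simp)), ih b hb (fun j hj => hz j (by simp [hj]))]

theorem fold_step_perm {t s : List Char} {l l' : List Nat} (h : l.Perm l') (b : Int) :
    l.foldl (pvStep t s) b = l'.foldl (pvStep t s) b := by
  have hcongr : ∀ (l₀ : List Nat) (b : Int), l₀.foldl (pvStep t s) b =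
      l₀.foldl (fun b i => max b ((pvRun t s i : Nat) : Int)) b := by
    intro l₀
    induction l₀ with
    | nil => intro b; rfl
    | cons i l₀ ih => intro b; simp only [List.foldl_cons]; rw [pvStep_eq_max, ih]
  rw [hcongr, hcongr]
  haveI : RightCommutative (fun (b : Int) (i : Nat) => max b ((pvRun t s i : Nat) : Int)) :=
    ⟨fun b i j => by simp only [max_right_comm]⟩
  exact h.foldl_eq b

theorem fold_step_nonneg {t s : List Char} :
    ∀ (l : List Nat) (b : Int), 0 ≤ b → 0 ≤ l.foldl (pvStep t s) b := by
  intro l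
  induction l with
  | nil => intro b hb; exact hb
  | cons i l ih =>
    intro b hb
    simp only [List.foldl_cons]
    exact ih _ (pvStep_nonneg hb i)

-- ===== VERDICT (by name: the statement is the Claim_ definition above) =====
theorem check_spec : Claim_equal_check := by
  unfold Claim_equal_check
  intro text sequence _ hpre
  unfold Spec_check
  by_cases hseq : sequence = ""
  · have htext : text = "" := by
      rcases hpre with h | h
      · exact absurd hseq h
      · exact h
    subst hseq htext
    decide
  · have hs : 1 ≤ sequence.toList.length := by
      have : sequence.toList ≠ [] := fun hc => hseq (String.toList_eq_nil_iff.mp hc)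
      cases hl : sequence.toList with
      | nil => exact absurd hl this
      | cons a l => simp
    rw [check_char hs, check_alt_char hs]
    have h1 : ((List.range (text.toList.length + 1 - sequence.toList.length)).reverse).foldl
        (pvStep text.toList sequence.toList) 0 =
        (List.range (text.toList.length + 1 - sequence.toList.length)).foldl
          (pvStep text.toList sequence.toList) 0 :=
      fold_step_perm (List.reverse_perm _) 0
    rw [h1]
    by_cases hnL : sequence.toList.length ≤ text.toList.length
    · have hsplit : text.toList.length =
          (text.toList.length + 1 - sequence.toList.length) +
            (text.toList.length - (text.toList.length + 1 - sequence.toList.length)) := by omega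
      conv_lhs => rw [hsplit, List.range_add, List.foldl_append]
      apply fold_step_zeros
      · exact fold_step_nonneg _ _ le_rfl
      · intro i hi
        simp only [List.mem_map, List.mem_range] at hi
        obtain ⟨k, _, rfl⟩ := hi
        exact pvRun_zero hs (by omega)
    · have hm : text.toList.length + 1 - sequence.toList.length = 0 := by omega
      rw [hm]
      apply fold_step_zeros
      · exact le_rfl
      · intro i hi
        simp only [List.mem_range] at hi
        exact pvRun_zero hs (by omega)
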